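-- pv_equiv track=rewrite | github.com/SnowColdplay/YanCheng | result的趋势.py | week
-- ===== SOURCE A (Python) =====
-- def week(x):
--     aaa=0
--     bbb=[0]
--     ccc=x[0]
--     for i in range(1,len(x)):
--         if  x[i]<=ccc:
--             aaa+=1
--         ccc=x[i]
--         bbb.append(aaa)
--     return bbb
-- ===== SOURCE B (Python) =====
-- def week(x):
--     # run-length strategy: collect the lengths of maximal segments between
--     # "drops" (positions where the value does not increase), then expand
--     # runs back into the output, run k at level k.
--     runs = []
--     cur = 1
--     for a, b in zip(x, x[1:]):
--         if b <= a:
--             runs.append(cur)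
--             cur = 1
--         else:
--             cur += 1
--     runs.append(cur)
--     out = []
--     for level, r in enumerate(runs):
--         out.extend([level] * r)
--     return out
-- ===== Notes on version B (the rewrite author's own statement) =====
-- stated objective: alternative
-- what changed: Replaces A's fused per-element counter loop with a run-length representation: first collect the lengths of maximal drop-free segments, then expand run k into r copies of level k.
import Mathlib
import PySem

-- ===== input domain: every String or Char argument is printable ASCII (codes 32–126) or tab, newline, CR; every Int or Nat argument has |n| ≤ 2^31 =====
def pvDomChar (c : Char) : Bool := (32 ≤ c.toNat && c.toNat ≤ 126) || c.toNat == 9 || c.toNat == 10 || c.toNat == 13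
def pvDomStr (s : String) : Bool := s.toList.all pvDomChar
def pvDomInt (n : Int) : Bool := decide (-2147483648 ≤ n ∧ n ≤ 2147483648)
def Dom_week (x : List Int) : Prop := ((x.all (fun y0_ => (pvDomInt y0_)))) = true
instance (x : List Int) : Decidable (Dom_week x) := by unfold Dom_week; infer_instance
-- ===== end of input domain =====

-- B replaces A's fused per-element counter loop by a run-length decomposition
-- (collect lengths of maximal drop-free segments, then expand run k at level k);
-- objective: alternative decomposition, same cost.

-- ===== PORT A =====
def week (x : List Int) : List Int :=
  -- aaa=0; bbb=[0]; ccc=x[0]; for i in range(1,len(x)): …  (x[0]/x[i] via pyGetD; in range under Pre_)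
  let s := (PySem.List.pyRange 1 (x.length : Int) 1).foldl
      (fun (st : Int × Int × List Int) i =>
        let xi := PySem.List.pyGetD x i 0
        let aaa := if xi ≤ st.2.1 then st.1 + 1 else st.1
        (aaa, xi, st.2.2 ++ [aaa]))
      ((0 : Int), PySem.List.pyGetD x 0 0, [(0 : Int)])
  s.2.2

-- ===== PORT B =====
def week_alt (x : List Int) : List Int :=
  -- pass 1: run lengths of maximal segments between drops (zip(x, x[1:]))
  let s := (x.zip (PySem.List.slice x (some 1) none)).foldl
      (fun (st : List Int × Int) p =>
        if p.2 ≤ p.1 then (st.1 ++ [st.2], 1) else (st.1, st.2 + 1))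
      ([], (1 : Int))
  let runs := s.1 ++ [s.2]
  -- pass 2: for level, r in enumerate(runs): out.extend([level] * r)
  (PySem.List.enumerate runs).foldl
      (fun out p => out ++ PySem.List.pyRepeat [p.1] p.2) []

-- ===== PRECONDITION & SPEC =====
-- Pre_ excludes only the empty list, on which A's first-element access raises IndexError.
def Pre_week (x : List Int) : Prop := x ≠ []
instance (x : List Int) : Decidable (Pre_week x) := by unfold Pre_week; infer_instance
def pvWitness_week : List Int := [3, 2, 2, 5]

def Spec_week (x : List Int) (out : List Int) : Prop := out = week_alt x
instance (x : List Int) (out : List Int) : Decidable (Spec_week x out) := by unfold Spec_week; infer_instance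

-- ===== CLAIM (what is proved, stated in full; the proofs are below) =====
def Claim_equal_week : Prop := ∀ (x : List Int), Dom_week x → Pre_week x → Spec_week x (week x)

-- ===== LEMMAS AND PROOFS =====

-- common reference: the per-element cumulative counts over the tail
def scanTail (acc prev : Int) : List Int → List Int
  | [] => []
  | v :: t =>
    (if v ≤ prev then acc + 1 else acc) :: scanTail (if v ≤ prev then acc + 1 else acc) v t

-- B's first pass, structurally: run lengths emitted at each drop, plus the open run
def runsTail (prev cur : Int) : List Int → List Int × Int
  | [] => ([], cur)
  | v :: t =>
    if v ≤ prev then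
      let r := runsTail v 1 t
      (cur :: r.1, r.2)
    else runsTail v (cur + 1) t

-- B's second pass, structurally: expand run lengths at increasing levels
def expandFrom (k : Int) : List Int → List Int
  | [] => []
  | r :: rs => List.replicate r.toNat k ++ expandFrom (k + 1) rs

-- A's loop appends scanTail to the accumulated output
theorem week_A_fold (t : List Int) :
    ∀ (prev acc : Int) (out : List Int),
    (t.foldl
      (fun (st : Int × Int × List Int) xi =>
        let aaa := if xi ≤ st.2.1 then st.1 + 1 else st.1
        (aaa, xi, st.2.2 ++ [aaa])) (acc, prev, out)).2.2
    = out ++ scanTail acc prev t := by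
  induction t with
  | nil => intro prev acc out; simp [scanTail]
  | cons v t ih =>
    intro prev acc out
    by_cases h : v ≤ prev <;>
      simp [List.foldl_cons, scanTail, h, ih, List.append_assoc]

-- B's first fold computes runsTail (appended to the accumulated run list)
theorem week_B_fold (t : List Int) :
    ∀ (prev cur : Int) (rs : List Int),
    (((prev :: t).zip t).foldl
      (fun (st : List Int × Int) p =>
        if p.2 ≤ p.1 then (st.1 ++ [st.2], 1) else (st.1, st.2 + 1)) (rs, cur))
    = (rs ++ (runsTail prev cur t).1, (runsTail prev cur t).2) := by
  induction t with
  | nil => intro prev cur rs; simp [runsTail]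
  | cons v t ih =>
    intro prev cur rs
    by_cases h : v ≤ prev <;>
      simp [List.zip_cons_cons, List.foldl_cons, runsTail, h, ih, List.append_assoc]

-- B's second fold is expandFrom
theorem week_B_expand (rs : List Int) :
    ∀ (k : Int) (out : List Int),
    ((PySem.List.enumerate rs k).foldl
      (fun out p => out ++ PySem.List.pyRepeat [p.1] p.2) out)
    = out ++ expandFrom k rs := by
  induction rs with
  | nil => intro k out; simp [PySem.List.enumerate_nil, expandFrom]
  | cons r rs ih =>
    intro k out
    rw [PySem.List.enumerate_cons, List.foldl_cons, ih, PySem.List.pyRepeat_singleton]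
    simp [expandFrom, List.append_assoc]

theorem replicate_shift (n : Nat) (k : Int) (L : List Int) (h : 1 ≤ n) :
    List.replicate (n - 1) k ++ k :: L = List.replicate n k ++ L := by
  obtain ⟨m, rfl⟩ : ∃ m, n = m + 1 := ⟨n - 1, by omega⟩
  simp [List.replicate_succ', List.append_assoc]

-- the heart: expanding the runs reproduces the cumulative counts
theorem week_main (t : List Int) :
    ∀ (prev k cur : Int), 1 ≤ cur →
    expandFrom k ((runsTail prev cur t).1 ++ [(runsTail prev cur t).2])
    = List.replicate (cur.toNat - 1) k ++ k :: scanTail k prev t := by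
  induction t with
  | nil =>
    intro prev k cur hcur
    simp only [runsTail, expandFrom, scanTail, List.nil_append, List.append_nil]
    rw [replicate_shift cur.toNat k [] (by omega)]
    simp
  | cons v t ih =>
    intro prev k cur hcur
    by_cases h : v ≤ prev
    · rw [show runsTail prev cur (v :: t) = (cur :: (runsTail v 1 t).1, (runsTail v 1 t).2)
          from by simp [runsTail, h]]
      simp only [List.cons_append, expandFrom]
      rw [ih v (k + 1) 1 (by norm_num)]
      simp only [Int.toNat_one, Nat.sub_self, List.replicate_zero, List.nil_append]
      simp only [scanTail, h, if_pos]
      rw [replicate_shift cur.toNat k ((k + 1) :: scanTail (k + 1) v t) (by omega)]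
    · rw [show runsTail prev cur (v :: t) = runsTail v (cur + 1) t from by simp [runsTail, h]]
      rw [ih v k (cur + 1) (by omega)]
      rw [show (cur + 1).toNat - 1 = cur.toNat from by omega]
      simp only [scanTail, h, if_neg, not_false_iff]
      rw [replicate_shift cur.toNat k (k :: scanTail k v t) (by omega)]

-- ===== VERDICT (by name: the statement is the Claim_ definition above) =====
theorem week_spec : Claim_equal_week := by
  intro x _ hpre
  unfold Spec_week week week_alt
  obtain ⟨c, t, rfl⟩ : ∃ c t, x = c :: t := by
    cases x with
    | nil => exact absurd rfl hpre
    | cons c t => exact ⟨c, t, rfl⟩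
  rw [PySem.List.slice_from_one]
  simp only [List.tail_cons]
  rw [PySem.List.pyGetD_zero_cons]
  have hfold := PySem.List.foldl_pyRange_pyGetD (xs := c :: t) (a := 1) (d := 0)
    (f := fun (st : Int × Int × List Int) xi =>
        let aaa := if xi ≤ st.2.1 then st.1 + 1 else st.1
        (aaa, xi, st.2.2 ++ [aaa]))
    (init := ((0 : Int), c, [(0 : Int)])) (by norm_num)
  simp only [PySem.List.len_eq] at hfold
  rw [hfold]
  simp only [Int.toNat_one, List.drop_one, List.tail_cons]
  rw [week_A_fold, week_B_fold, week_B_expand]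
  have := week_main t c 0 1 (by norm_num)
  simp only [Int.toNat_one, Nat.sub_self, List.replicate_zero, List.nil_append] at this
  simp [this]
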